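-- pv_equiv track=rewrite | github.com/swan-Dive/is4 | agent_2.py | form_tickets
-- ===== SOURCE A (Python) =====
-- def form_tickets(questions):
--     from collections import defaultdict
--     by_section = defaultdict(list)
--     for q in questions:
--         by_section[q[1]].append(q)
--
--     pairs = []
--     sections = list(by_section.keys())
--     for i in range(len(sections)):
--         for j in range(i + 1, len(sections)):
--             sec1 = sections[i]
--             sec2 = sections[j]
--             for q1 in by_section[sec1]:
--                 for q2 in by_section[sec2]:
--                     pairs.append((q1, q2))
--
--     pairs.sort(key=lambda pair: pair[0][2] + pair[1][2])
--
--     used = set()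
--     tickets = []
--     for p in pairs:
--         ids = (p[0][0], p[1][0])
--         if ids[0] not in used and ids[1] not in used:
--             tickets.append(p)
--             used.update(ids)
--
--     return tickets
-- ===== SOURCE B (Python) =====
-- def form_tickets(questions):
--     by_section = {}
--     for q in questions:
--         by_section.setdefault(q[1], []).append(q)
--
--     sections = list(by_section)
--     candidates = []
--     for i in range(len(sections)):
--         for j in range(i + 1, len(sections)):
--             for q1 in by_section[sections[i]]:
--                 for q2 in by_section[sections[j]]:
--                     candidates.append((q1, q2))
--
--     tickets = []
--     while candidates:
--         best = min(candidates, key=lambda p: p[0][2] + p[1][2])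
--         tickets.append(best)
--         a, b = best[0][0], best[1][0]
--         candidates = [p for p in candidates
--                       if p[0][0] != a and p[0][0] != b
--                       and p[1][0] != a and p[1][0] != b]
--     return tickets
-- ===== Notes on version B (the rewrite author's own statement) =====
-- stated objective: alternative
-- what changed: B never sorts the cross-section pair list and keeps no 'used' set: a while loop repeatedly selects the minimum-sum candidate with min (first on ties, matching the stable sort's tie order) and prunes every remaining candidate sharing an id with it.
import Mathlib
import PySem

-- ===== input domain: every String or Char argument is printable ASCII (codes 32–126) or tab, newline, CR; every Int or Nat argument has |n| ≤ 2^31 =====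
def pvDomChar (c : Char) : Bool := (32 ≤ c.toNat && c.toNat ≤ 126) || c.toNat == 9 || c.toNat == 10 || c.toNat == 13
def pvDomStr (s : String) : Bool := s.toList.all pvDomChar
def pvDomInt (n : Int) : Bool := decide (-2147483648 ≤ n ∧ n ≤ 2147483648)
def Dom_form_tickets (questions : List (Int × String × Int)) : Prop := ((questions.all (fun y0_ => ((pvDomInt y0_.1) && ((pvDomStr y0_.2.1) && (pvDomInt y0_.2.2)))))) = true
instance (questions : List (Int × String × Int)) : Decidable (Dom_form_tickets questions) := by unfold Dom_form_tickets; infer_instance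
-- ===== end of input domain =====

-- B replaces A's materialize-sort-then-greedy-scan with repeated selection: no sort and no
-- 'used' set — each round picks the min-sum candidate (first on ties, like Python's min) and
-- prunes every remaining pair sharing an id with it (objective: alternative).

abbrev PvQ := Int × String × Int
abbrev PvPair := PvQ × PvQ

-- shared grouping loop ('for q in questions: by_section[q[1]].append(q)')
def pvGroup (questions : List PvQ) : PySem.Dict String (List PvQ) :=
  questions.foldl (fun d q => d.modify q.2.1 [] (fun l => l ++ [q])) PySem.Dict.empty

-- shared nested pair-enumeration loops (identical in Source A and Source B)
def pvPairs (questions : List PvQ) : List PvPair :=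
  let bySection := pvGroup questions
  let sections := bySection.keys
  (PySem.List.pyRange 0 (sections.length : Int) 1).foldl (fun acc i =>
    (PySem.List.pyRange (i + 1) (sections.length : Int) 1).foldl (fun acc j =>
      (bySection.getD (PySem.List.pyGetD sections i "") []).foldl (fun acc q1 =>
        (bySection.getD (PySem.List.pyGetD sections j "") []).foldl
          (fun acc q2 => acc ++ [(q1, q2)]) acc) acc) acc) []

-- ===== PORT A =====
-- A's greedy body ('if ids not used: append pair, mark both used')
def pvStep (st : PySem.Set Int × List PvPair) (p : PvPair) : PySem.Set Int × List PvPair :=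
  if !(PySem.Set.contains st.1 p.1.1) && !(PySem.Set.contains st.1 p.2.1) then
    (PySem.Set.add (PySem.Set.add st.1 p.1.1) p.2.1, st.2 ++ [p])
  else st

def form_tickets (questions : List PvQ) : List PvPair :=
  let pairs := pvPairs questions
  let sortedPairs := PySem.List.sorted pairs (fun p => p.1.2.2 + p.2.2.2)
  (sortedPairs.foldl pvStep (PySem.Set.empty, [])).2

-- ===== PORT B =====
-- Source B's 'key=lambda p: p[0][2] + p[1][2]'
def pvKey (p : PvPair) : Int := p.1.2.2 + p.2.2.2

-- termination of Source B's while loop: the selected pair itself is pruned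
theorem pvFilter_lt {α : Type} (l : List α) (f : α → Bool) (x : α) (hx : x ∈ l)
    (hf : f x = false) : (l.filter f).length < l.length := by
  have h1 := List.length_eq_length_filter_add (l := l) f
  have h2 : 0 < (l.filter (fun a => !f a)).length :=
    List.length_pos_of_mem (List.mem_filter.mpr ⟨hx, by simp [hf]⟩)
  omega

-- Source B's while loop: pick the min-sum candidate (Python min = first minimal), prune, repeat
def pvSelLoop (cands : List PvPair) : List PvPair :=
  match h : PySem.List.min? cands pvKey with
  | none => []
  | some best =>
      best :: pvSelLoop (cands.filter (fun p => p.1.1 != best.1.1 && (p.1.1 != best.2.1 &&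
        (p.2.1 != best.1.1 && p.2.1 != best.2.1))))
termination_by cands.length
decreasing_by
  have hmem := PySem.List.min?_mem h
  have hlt := pvFilter_lt cands.attach
    (fun x => (↑x : PvPair).1.1 != best.1.1 && ((↑x : PvPair).1.1 != best.2.1 &&
      ((↑x : PvPair).2.1 != best.1.1 && (↑x : PvPair).2.1 != best.2.1)))
    ⟨best, hmem⟩ (List.mem_attach _ _) (by simp)
  simpa using hlt

def form_tickets_alt (questions : List PvQ) : List PvPair :=
  let candidates := pvPairs questions
  pvSelLoop candidates

-- ===== PRECONDITION & SPEC =====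
def Spec_form_tickets (questions : List (Int × String × Int)) (out : List ((Int × String × Int) × (Int × String × Int))) : Prop := out = form_tickets_alt questions
instance (questions : List (Int × String × Int)) (out : List ((Int × String × Int) × (Int × String × Int))) : Decidable (Spec_form_tickets questions out) := by unfold Spec_form_tickets; infer_instance

-- ===== CLAIM (what is proved, stated in full; the proofs are below) =====
def Claim_equal_form_tickets : Prop := ∀ (questions : List (Int × String × Int)), Dom_form_tickets questions → Spec_form_tickets questions (form_tickets questions)

-- ===== LEMMAS AND PROOFS =====

-- 'both ids unused' test of A's greedy body, as a predicate of the used-set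
def pvOk (S : PySem.Set Int) (p : PvPair) : Bool :=
  !(PySem.Set.contains S p.1.1) && !(PySem.Set.contains S p.2.1)

-- Source B's pruning predicate after selecting 'best'
def pvPrune (best : PvPair) (p : PvPair) : Bool :=
  p.1.1 != best.1.1 && (p.1.1 != best.2.1 && (p.2.1 != best.1.1 && p.2.1 != best.2.1))

theorem pvSelLoop_nil : pvSelLoop [] = [] := by unfold pvSelLoop; rfl

theorem pvSelLoop_cons (C : List PvPair) (b : PvPair)
    (h : PySem.List.min? C pvKey = some b) :
    pvSelLoop C = b :: pvSelLoop (C.filter (pvPrune b)) := by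
  conv_lhs => unfold pvSelLoop
  rw [h]
  rfl

theorem pvContains_add (s : PySem.Set Int) (x y : Int) :
    PySem.Set.contains (PySem.Set.add s x) y = (PySem.Set.contains s y || y == x) := by
  simp only [PySem.Set.contains, List.contains_eq_mem]
  by_cases hxy : y = x
  · subst hxy
    have : y ∈ PySem.Set.add s y := (PySem.Set.mem_add s y y).mpr (Or.inr rfl)
    simp [this]
  · have : (y ∈ PySem.Set.add s x) ↔ y ∈ s := by
      rw [PySem.Set.mem_add]; simp [hxy]
    simp [this, hxy]

-- Python's min(xs, key) is the head of the stable sort by the same key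
theorem pvMin_eq_head_sorted (C : List PvPair) :
    PySem.List.min? C pvKey = (PySem.List.sorted C pvKey).head? := by
  induction C using List.reverseRecOn with
  | nil => rfl
  | append_singleton C x ih =>
    have hsort : PySem.List.sorted (C ++ [x]) pvKey
        = PySem.List.insertBy (fun a b => decide (pvKey a < pvKey b)) x
            (PySem.List.sorted C pvKey) := by
      rw [PySem.List.sorted_eq_foldl_insertBy, PySem.List.sorted_eq_foldl_insertBy,
        List.foldl_append]
      rfl
    rw [hsort]
    cases hC : PySem.List.sorted C pvKey with
    | nil =>
      have hCnil : C = [] := (PySem.List.sorted_eq_nil_iff C pvKey false).mp hC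
      subst hCnil
      rfl
    | cons b T =>
      have hmC : PySem.List.min? C pvKey = some b := by rw [ih, hC]; rfl
      have hL : PySem.List.min? (C ++ [x]) pvKey
          = if pvKey x < pvKey b then some x else some b := by
        simp only [PySem.List.min?] at hmC ⊢
        rw [List.foldl_append, hmC]
        rfl
      rw [hL]
      by_cases hlt : pvKey x < pvKey b <;> simp [PySem.List.insertBy, hlt]

-- filtering commutes with insertion into a key-sorted list
theorem pvFilter_insertBy (q : PvPair → Bool) (x : PvPair) (l : List PvPair)
    (hl : l.Pairwise (fun a b => pvKey a ≤ pvKey b)) :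
    (PySem.List.insertBy (fun a b => decide (pvKey a < pvKey b)) x l).filter q
      = if q x then PySem.List.insertBy (fun a b => decide (pvKey a < pvKey b)) x (l.filter q)
        else l.filter q := by
  induction l with
  | nil => by_cases hq : q x <;> simp [PySem.List.insertBy, hq]
  | cons y t ih =>
    rcases List.pairwise_cons.mp hl with ⟨hy, ht⟩
    by_cases hlt : pvKey x < pvKey y
    · simp only [PySem.List.insertBy, hlt, decide_true, if_true]
      by_cases hq : q x
      · rw [List.filter_cons, if_pos hq]
        cases hft : (y :: t).filter q with
        | nil => simp [hq, PySem.List.insertBy]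
        | cons z rest =>
          have hz : z ∈ y :: t := (List.mem_filter.mp (hft ▸ List.mem_cons_self)).1
          have hzk : pvKey x < pvKey z := by
            rcases List.mem_cons.mp hz with rfl | hz'
            · exact hlt
            · exact lt_of_lt_of_le hlt (hy z hz')
          simp [hq, PySem.List.insertBy, hzk]
      · simp [hq]
    · simp only [PySem.List.insertBy, hlt, decide_false, Bool.false_eq_true, if_false]
      rw [List.filter_cons, List.filter_cons]
      by_cases hqy : q y
      · simp only [hqy, if_true]
        rw [ih ht]
        by_cases hq : q x
        · simp [hq, PySem.List.insertBy, hlt]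
        · simp [hq]
      · simp only [hqy, Bool.false_eq_true, if_false]
        exact ih ht

-- filtering commutes with the stable sort
theorem pvSorted_filter (q : PvPair → Bool) (C : List PvPair) :
    (PySem.List.sorted C pvKey).filter q = PySem.List.sorted (C.filter q) pvKey := by
  induction C using List.reverseRecOn with
  | nil => rfl
  | append_singleton C x ih =>
    have hsort : ∀ (D : List PvPair), PySem.List.sorted (D ++ [x]) pvKey
        = PySem.List.insertBy (fun a b => decide (pvKey a < pvKey b)) x
            (PySem.List.sorted D pvKey) := by
      intro D
      rw [PySem.List.sorted_eq_foldl_insertBy, PySem.List.sorted_eq_foldl_insertBy,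
        List.foldl_append]
      rfl
    rw [hsort C, pvFilter_insertBy q x _ (PySem.List.sorted_pairwise C pvKey), ih,
      List.filter_append]
    by_cases hq : q x
    · simp only [List.filter_cons, hq, if_true, List.filter_nil]
      rw [hsort (C.filter q)]
    · simp [hq]

-- A's greedy fold ignores pairs its current used-set already blocks
theorem pvFoldl_filter_absorb : ∀ (n : Nat) (L : List PvPair) (S : PySem.Set Int)
    (acc : List PvPair), L.length ≤ n →
    L.foldl pvStep (S, acc) = (L.filter (pvOk S)).foldl pvStep (S, acc) := by
  intro n
  induction n with
  | zero =>
    intro L S acc hL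
    have : L = [] := List.eq_nil_of_length_eq_zero (Nat.le_zero.mp hL)
    subst this; rfl
  | succ n ih =>
    intro L S acc hL
    cases L with
    | nil => rfl
    | cons p T =>
      simp only [List.length_cons, Nat.succ_le_succ_iff] at hL
      by_cases hok : pvOk S p = true
      · have hcond : (!(PySem.Set.contains S p.1.1) && !(PySem.Set.contains S p.2.1)) = true := by
          simpa [pvOk] using hok
        have hstep : pvStep (S, acc) p
            = (PySem.Set.add (PySem.Set.add S p.1.1) p.2.1, acc ++ [p]) := by
          simp only [pvStep]
          rw [if_pos hcond]
        set S' := PySem.Set.add (PySem.Set.add S p.1.1) p.2.1 with hS'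
        have hmono : ∀ r : PvPair, pvOk S' r = true → pvOk S r = true := by
          intro r hr
          simp only [hS', pvOk, pvContains_add, Bool.and_eq_true, Bool.not_eq_true',
            Bool.or_eq_false_iff] at hr ⊢
          exact ⟨hr.1.1.1, hr.2.1.1⟩
        calc (p :: T).foldl pvStep (S, acc)
            = T.foldl pvStep (S', acc ++ [p]) := by rw [List.foldl_cons, hstep]
          _ = (T.filter (pvOk S')).foldl pvStep (S', acc ++ [p]) := ih T S' _ hL
          _ = ((T.filter (pvOk S)).filter (pvOk S')).foldl pvStep (S', acc ++ [p]) := by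
              have hcg : ∀ r ∈ T, (pvOk S' r && pvOk S r) = pvOk S' r := by
                intro r _
                by_cases h' : pvOk S' r = true
                · simp [h', hmono r h']
                · have h'' : pvOk S' r = false := by
                    revert h'; cases pvOk S' r <;> simp
                  simp [h'']
              rw [List.filter_filter, List.filter_congr hcg]
          _ = (T.filter (pvOk S)).foldl pvStep (S', acc ++ [p]) :=
              (ih (T.filter (pvOk S)) S' _ (le_trans (List.length_filter_le _ _) hL)).symm
          _ = ((p :: T).filter (pvOk S)).foldl pvStep (S, acc) := by
              rw [List.filter_cons, if_pos hok, List.foldl_cons, hstep]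
      · have hcond : (!(PySem.Set.contains S p.1.1) && !(PySem.Set.contains S p.2.1)) = false := by
          simpa [pvOk] using hok
        have hstep : pvStep (S, acc) p = (S, acc) := by
          simp only [pvStep]
          have hnc : ¬ ((!S.contains p.1.1 && !S.contains p.2.1) = true) := by
            rw [hcond]; simp
          rw [if_neg hnc]
        rw [List.foldl_cons, hstep, List.filter_cons,
          if_neg (by simpa using hok), ih T S acc hL]

-- main invariant: A's greedy scan of the sorted list = B's selection loop,
-- given that the used-set blocks nothing in the candidate list
theorem pvMain : ∀ (n : Nat) (C : List PvPair) (S : PySem.Set Int) (acc : List PvPair),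
    C.length ≤ n → (∀ p ∈ C, pvOk S p = true) →
    ((PySem.List.sorted C pvKey).foldl pvStep (S, acc)).2 = acc ++ pvSelLoop C := by
  intro n
  induction n with
  | zero =>
    intro C S acc hC _
    have : C = [] := List.eq_nil_of_length_eq_zero (Nat.le_zero.mp hC)
    subst this
    rw [pvSelLoop_nil]
    simp [PySem.List.sorted_eq_foldl_insertBy]
  | succ n ih =>
    intro C S acc hC hok
    cases hsC : PySem.List.sorted C pvKey with
    | nil =>
      have : C = [] := (PySem.List.sorted_eq_nil_iff C pvKey false).mp hsC
      subst this
      rw [pvSelLoop_nil]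
      simp
    | cons b T =>
      have hbC : b ∈ C := by
        rw [← PySem.List.mem_sorted (key := pvKey) (rev := false), hsC]
        exact List.mem_cons_self
      have hmin : PySem.List.min? C pvKey = some b := by
        rw [pvMin_eq_head_sorted, hsC]; rfl
      have hokb := hok b hbC
      have hcond : (!(PySem.Set.contains S b.1.1) && !(PySem.Set.contains S b.2.1)) = true := by
        simpa [pvOk] using hokb
      have hstep : pvStep (S, acc) b
          = (PySem.Set.add (PySem.Set.add S b.1.1) b.2.1, acc ++ [b]) := by
        simp only [pvStep]
        rw [if_pos hcond]
      set S' := PySem.Set.add (PySem.Set.add S b.1.1) b.2.1 with hS'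
      have hokS' : ∀ p ∈ C, pvOk S' p = pvPrune b p := by
        intro p hp
        have hpS := hok p hp
        simp only [pvOk, Bool.and_eq_true, Bool.not_eq_true'] at hpS
        simp only [hS', pvOk, pvPrune, pvContains_add, hpS.1, hpS.2, Bool.false_or, bne]
        cases h1 : p.1.1 == b.1.1 <;> cases h2 : p.1.1 == b.2.1 <;>
          cases h3 : p.2.1 == b.1.1 <;> cases h4 : p.2.1 == b.2.1 <;> rfl
      have hokb' : pvOk S' b = false := by
        simp [hS', pvOk]
      have hfT : T.filter (pvOk S') = PySem.List.sorted (C.filter (pvPrune b)) pvKey := by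
        have h1 : (b :: T).filter (pvOk S') = T.filter (pvOk S') := by
          rw [List.filter_cons, if_neg (by simp [hokb'])]
        rw [← h1, ← hsC, pvSorted_filter, List.filter_congr hokS']
      have hlen : (C.filter (pvPrune b)).length ≤ n := by
        have h1 : (C.filter (pvPrune b)).length < C.length :=
          pvFilter_lt C (pvPrune b) b hbC (by simp [pvPrune])
        omega
      have hokC' : ∀ p ∈ C.filter (pvPrune b), pvOk S' p = true := by
        intro p hp
        rcases List.mem_filter.mp hp with ⟨hpC, hpr⟩
        rw [hokS' p hpC]; exact hpr
      calc ((b :: T).foldl pvStep (S, acc)).2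
          = (T.foldl pvStep (S', acc ++ [b])).2 := by rw [List.foldl_cons, hstep]
        _ = ((T.filter (pvOk S')).foldl pvStep (S', acc ++ [b])).2 := by
            rw [pvFoldl_filter_absorb T.length T S' _ le_rfl]
        _ = ((PySem.List.sorted (C.filter (pvPrune b)) pvKey).foldl pvStep
              (S', acc ++ [b])).2 := by rw [hfT]
        _ = (acc ++ [b]) ++ pvSelLoop (C.filter (pvPrune b)) := ih _ S' _ hlen hokC'
        _ = acc ++ (b :: pvSelLoop (C.filter (pvPrune b))) := by simp
        _ = acc ++ pvSelLoop C := by rw [← pvSelLoop_cons C b hmin]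

-- ===== VERDICT (by name: the statement is the Claim_ definition above) =====
theorem form_tickets_spec : Claim_equal_form_tickets := by
  intro questions _
  show form_tickets questions = form_tickets_alt questions
  have h := pvMain (pvPairs questions).length (pvPairs questions) PySem.Set.empty []
    le_rfl (fun p _ => rfl)
  simpa [form_tickets, form_tickets_alt] using h
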